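-- pv_equiv track=rewrite | github.com/qudwn1114/Algorithm | Programmers/2019 카카오 개발자 겨울 인턴십/불량_사용자.py | count_combination
-- ===== SOURCE A (Python) =====
-- def count_combination(arr) -> int:
--     combination = []
--     for i in arr:
--         if combination:
--             copy_c = combination.copy()
--             combination = []
--             for j in i:
--                 for k in copy_c:
--                     temp = k.copy()
--                     if j not in temp:
--                         temp.append(j)
--                         temp.sort()
--                         if temp not in combination:
--                             combination.append(temp)
--         else:
--             # 초기화
--             for j in i:
--                 temp = []
--                 temp.append(j)
--                 combination.append(temp)
--
--     count = len(combination)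
--     return count
-- ===== SOURCE B (Python) =====
-- def count_combination(arr) -> int:
--     # Recursive backtracking: walk the groups depth-first with one running set of
--     # chosen elements, collecting each complete all-distinct selection as a
--     # frozenset for deduplication; no groups means no selections.
--     if not arr:
--         return 0
--     results = set()
--
--     def dfs(i, chosen):
--         if i == len(arr):
--             results.add(frozenset(chosen))
--             return
--         for j in arr[i]:
--             if j not in chosen:
--                 dfs(i + 1, chosen | {j})
--
--     dfs(0, frozenset())
--     return len(results)
-- ===== Notes on version B (the rewrite author's own statement) =====
-- stated objective: alternative
-- what changed: Replaces A's iterative level-by-level expansion (rebuilding a list of sorted partial combinations per group with linear-scan dedup) by recursive depth-first backtracking carrying one running frozenset of chosen elements and collecting complete selections in a results set.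
-- intended difference: On inputs where A's running level dies (some prefix of the groups has no all-distinct selection) but later groups re-seed it, A counts selections of only a trailing segment of the groups, and on a single group with duplicates A counts duplicate singletons; B returns the number of distinct complete all-distinct selections (0, resp. the deduplicated count), the intended value. — e.g. on count_combination([[1], [1], [2]]): A returns 1, B returns 0
import Mathlib
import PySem

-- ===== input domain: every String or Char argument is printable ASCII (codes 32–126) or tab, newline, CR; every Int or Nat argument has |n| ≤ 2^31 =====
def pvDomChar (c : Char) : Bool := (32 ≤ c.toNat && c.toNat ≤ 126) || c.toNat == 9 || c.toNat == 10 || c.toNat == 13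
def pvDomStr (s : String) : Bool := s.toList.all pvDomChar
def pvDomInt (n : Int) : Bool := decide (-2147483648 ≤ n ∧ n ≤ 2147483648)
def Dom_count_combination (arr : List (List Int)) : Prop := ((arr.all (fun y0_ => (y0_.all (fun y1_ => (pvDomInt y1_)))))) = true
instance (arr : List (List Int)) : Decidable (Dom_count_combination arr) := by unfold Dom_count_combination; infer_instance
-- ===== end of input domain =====

-- B replaces A's iterative level-by-level expansion of sorted lists by recursive
-- backtracking over the groups with one running set of chosen elements (objective:
-- alternative); on the corner inputs described at D_ below, B's value is the intended one.

-- ===== PORT A =====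
-- the `else` branch of A's `if combination:` (initialisation from the current group)
def initLevel (i : List Int) : List (List Int) :=
  i.foldl (fun combination j => combination ++ [[j]]) []

-- the `then` branch: nested `for j in i: for k in copy_c:` rebuilding the level from scratch
def nextLevel (i : List Int) (copy_c : List (List Int)) : List (List Int) :=
  i.foldl (fun combination j =>
    copy_c.foldl (fun combination k =>
      if j ∉ k then
        let temp := PySem.List.sorted (k ++ [j]) (fun x => x) false
        if temp ∉ combination then combination ++ [temp] else combination
      else combination) combination) []

def count_combination (arr : List (List Int)) : Int :=
  ((arr.foldl (fun combination i =>
      if combination ≠ [] then nextLevel i combination else initLevel i) []).length : Int)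

-- ===== PORT B =====
-- dfs(i, chosen) of Source B, structurally recursing on the groups still to process.
-- `chosen` (a Python frozenset, distinct by construction) is carried in insertion order;
-- `frozenset(chosen)` added to `results` is represented canonically by its sorted element
-- list — exact for Python's equality of int frozensets.
def dfsB : List (List Int) → List Int → PySem.Set (List Int) → PySem.Set (List Int)
  | [], chosen, results => PySem.Set.add results (PySem.List.sorted chosen (fun x => x) false)
  | g :: rest, chosen, results =>
      g.foldl (fun results j =>
        if j ∉ chosen then dfsB rest (chosen ++ [j]) results else results) results

def count_combination_alt (arr : List (List Int)) : Int :=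
  if arr = [] then 0 else ((dfsB arr [] PySem.Set.empty).length : Int)

-- ===== PRECONDITION & SPEC =====
-- helpers for D_ (not used by either port): sdrB gs = "one element per group, all distinct, exists";
-- lastSeg gs = the suffix of groups since A's level was last (re)initialised.
def sdrB (gs : List (List Int)) : Bool := gs.sections.any (decide ·.Nodup)

def segStep (seg : List (List Int)) (g : List Int) : List (List Int) :=
  if sdrB (List.cons g seg) then List.cons g seg else []

def lastSeg (gs : List (List Int)) : List (List Int) := gs.foldl segStep []

-- On inputs where A's running level dies (some prefix of the groups admits no all-distinct
-- selection) yet later groups re-seed it, A returns the count for only a trailing segment of the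
-- groups, and on a single group with duplicate entries A counts duplicate singletons; B returns
-- the number of distinct complete all-distinct selections (0, resp. the deduplicated count),
-- which is the intended value.
def D_count_combination (arr : List (List Int)) : Prop :=
  lastSeg arr ≠ [] ∧ ¬ sdrB arr ∨ arr.length = 1 ∧ ¬ arr.flatten.Nodup
instance (arr : List (List Int)) : Decidable (D_count_combination arr) := by
  unfold D_count_combination; infer_instance

def Spec_count_combination (arr : List (List Int)) (out : Int) : Prop :=
  ¬ D_count_combination arr → out = count_combination_alt arr
instance (arr : List (List Int)) (out : Int) : Decidable (Spec_count_combination arr out) := by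
  unfold Spec_count_combination; infer_instance

def pvDiffWitness_count_combination : List (List Int) := [[1], [1], [2]]
def pvDiffWitnessOut_count_combination : Int × Int := (1, 0)

-- ===== CLAIM (what is proved, stated in full; the proofs are below) =====
def Claim_unchanged_count_combination : Prop :=
  ∀ (arr : List (List Int)), Dom_count_combination arr → Spec_count_combination arr (count_combination arr)
def Claim_changed_count_combination : Prop :=
  Dom_count_combination (pvDiffWitness_count_combination) ∧ D_count_combination (pvDiffWitness_count_combination) ∧ count_combination (pvDiffWitness_count_combination) = pvDiffWitnessOut_count_combination.1 ∧ count_combination_alt (pvDiffWitness_count_combination) = pvDiffWitnessOut_count_combination.2 ∧ pvDiffWitnessOut_count_combination.1 ≠ pvDiffWitnessOut_count_combination.2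
def Claim_exact_count_combination : Prop :=
  ∀ (arr : List (List Int)), Dom_count_combination arr → D_count_combination arr → count_combination arr ≠ count_combination_alt arr

-- ===== LEMMAS AND PROOFS =====

-- the canonical (sorted) representative both ports use for a set of chosen ints
def canonL (l : List Int) : List Int := PySem.List.sorted l (fun x => x) false

-- "a system of distinct representatives": one element per group, all distinct
def SDR (gs : List (List Int)) : Prop :=
  ∃ sel, List.Forall₂ (· ∈ ·) sel gs ∧ sel.Nodup

def aStep (combination : List (List Int)) (i : List Int) : List (List Int) :=
  if combination ≠ [] then nextLevel i combination else initLevel i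

lemma count_A_eq (arr : List (List Int)) :
    count_combination arr = ((arr.foldl aStep []).length : Int) := rfl

lemma sdrB_iff (gs : List (List Int)) : sdrB gs = true ↔ SDR gs := by
  simp [sdrB, SDR, List.any_eq_true, List.mem_sections]

lemma forall2_snoc {α β : Type} {R : α → β → Prop} (p : List β) (g : β) (sel : List α) :
    List.Forall₂ R sel (p ++ [g]) ↔ ∃ s j, sel = s ++ [j] ∧ List.Forall₂ R s p ∧ R j g := by
  induction p generalizing sel with
  | nil =>
    simp only [List.nil_append]
    constructor
    · intro h
      cases h with
      | cons h1 h2 =>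
        cases h2
        exact ⟨[], _, rfl, List.Forall₂.nil, h1⟩
    · rintro ⟨s, j, rfl, hs, hj⟩
      cases hs
      simpa using List.Forall₂.cons hj List.Forall₂.nil
  | cons q p ih =>
    constructor
    · intro h
      rw [List.cons_append] at h
      cases h with
      | cons h1 h2 =>
        obtain ⟨s, j, rfl, hs, hj⟩ := (ih _).1 h2
        exact ⟨_ :: s, j, rfl, List.Forall₂.cons h1 hs, hj⟩
    · rintro ⟨s, j, rfl, hs, hj⟩
      cases hs with
      | cons h1 h2 =>
        rw [List.cons_append]
        exact List.Forall₂.cons h1 ((ih _).2 ⟨_, j, rfl, h2, hj⟩)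

lemma sdr_single (g : List Int) : SDR [g] ↔ g ≠ [] := by
  constructor
  · rintro ⟨sel, hf, -⟩
    cases hf with
    | cons h1 h2 =>
      intro hg
      subst hg
      simp at h1
  · intro hg
    obtain ⟨j, hj⟩ := List.exists_mem_of_ne_nil g hg
    exact ⟨[j], List.Forall₂.cons hj List.Forall₂.nil, by simp⟩

lemma forall2_reverse {α β : Type} {R : α → β → Prop} {l₁ : List α} {l₂ : List β}
    (h : List.Forall₂ R l₁ l₂) : List.Forall₂ R l₁.reverse l₂.reverse := by
  induction h with
  | nil => simp
  | cons h1 h2 ih =>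
    simp only [List.reverse_cons]
    exact (forall2_snoc _ _ _).2 ⟨_, _, rfl, ih, h1⟩

lemma sdr_reverse (l : List (List Int)) : SDR l.reverse ↔ SDR l := by
  constructor
  · rintro ⟨sel, hf, hnd⟩
    exact ⟨sel.reverse, by simpa using forall2_reverse hf, by simpa using hnd⟩
  · rintro ⟨sel, hf, hnd⟩
    exact ⟨sel.reverse, forall2_reverse hf, by simpa using hnd⟩

lemma sdr_of_append (p : List (List Int)) (g : List Int) : SDR (p ++ [g]) → SDR p := by
  rintro ⟨sel, hf, hnd⟩
  obtain ⟨s, j, rfl, hf', -⟩ := (forall2_snoc p g sel).1 hf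
  exact ⟨s, hf', hnd.sublist (List.sublist_append_left s [j])⟩

lemma not_sdr_append (p : List (List Int)) (g : List Int)
    (h : sdrB p = false) : sdrB (p ++ [g]) = false := by
  cases hsd : sdrB (p ++ [g]) with
  | false => rfl
  | true =>
    have := sdr_of_append p g ((sdrB_iff _).1 hsd)
    rw [(sdrB_iff p).2 this] at h
    simp at h

lemma canonL_perm (l : List Int) : (canonL l).Perm l :=
  PySem.List.sorted_perm l (fun x => x) false

lemma mem_canonL (x : Int) (l : List Int) : x ∈ canonL l ↔ x ∈ l :=
  PySem.List.mem_sorted l (fun x => x) false x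

lemma canonL_singleton (j : Int) : canonL [j] = [j] :=
  PySem.List.sorted_eq_self_of_pairwise [j] (fun x => x) (by simp)

lemma canonL_congr {l l' : List Int} (h : l.Perm l') : canonL l = canonL l' :=
  PySem.List.sorted_eq_sorted_of_perm l l' (fun x => x) (fun _ _ h => h) h

lemma nodup_snoc {l : List Int} {j : Int} (h : l.Nodup) (hj : j ∉ l) : (l ++ [j]).Nodup := by
  simp [List.nodup_append, h]
  intro a ha hb
  exact hj (hb ▸ ha)

-- ---- A-side membership and Nodup lemmas ----

lemma innerA_mem (j : Int) (copy_c : List (List Int)) (comb : List (List Int)) (l : List Int) :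
    l ∈ copy_c.foldl (fun combination k =>
      if j ∉ k then
        let temp := PySem.List.sorted (k ++ [j]) (fun x => x) false
        if temp ∉ combination then combination ++ [temp] else combination
      else combination) comb ↔
    l ∈ comb ∨ ∃ k ∈ copy_c, j ∉ k ∧ l = canonL (k ++ [j]) := by
  induction copy_c generalizing comb with
  | nil => simp
  | cons k ks ih =>
    simp only [List.foldl_cons, ih]
    by_cases hjk : j ∉ k
    · simp only [if_pos hjk]
      by_cases hmem : PySem.List.sorted (k ++ [j]) (fun x => x) false ∉ comb
      · simp only [if_pos hmem, List.mem_append, List.mem_singleton]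
        constructor
        · rintro ((h | rfl) | h)
          · exact Or.inl h
          · exact Or.inr ⟨k, by simp, hjk, rfl⟩
          · rcases h with ⟨k', hk', hjk', rfl⟩
            exact Or.inr ⟨k', by simp [hk'], hjk', rfl⟩
        · rintro (h | ⟨k', hk', hjk', rfl⟩)
          · exact Or.inl (Or.inl h)
          · rcases List.mem_cons.1 hk' with rfl | hk'
            · exact Or.inl (Or.inr rfl)
            · exact Or.inr ⟨k', hk', hjk', rfl⟩
      · simp only [if_neg hmem]
        rw [not_not] at hmem
        constructor
        · rintro (h | ⟨k', hk', hjk', rfl⟩)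
          · exact Or.inl h
          · exact Or.inr ⟨k', by simp [hk'], hjk', rfl⟩
        · rintro (h | ⟨k', hk', hjk', rfl⟩)
          · exact Or.inl h
          · rcases List.mem_cons.1 hk' with rfl | hk'
            · exact Or.inl hmem
            · exact Or.inr ⟨k', hk', hjk', rfl⟩
    · simp only [if_neg hjk]
      rw [not_not] at hjk
      constructor
      · rintro (h | ⟨k', hk', hjk', rfl⟩)
        · exact Or.inl h
        · exact Or.inr ⟨k', by simp [hk'], hjk', rfl⟩
      · rintro (h | ⟨k', hk', hjk', rfl⟩)
        · exact Or.inl h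
        · rcases List.mem_cons.1 hk' with rfl | hk'
          · exact absurd hjk (by simpa using hjk')
          · exact Or.inr ⟨k', hk', hjk', rfl⟩

lemma innerA_nodup (j : Int) (copy_c : List (List Int)) (comb : List (List Int))
    (h : comb.Nodup) :
    (copy_c.foldl (fun combination k =>
      if j ∉ k then
        let temp := PySem.List.sorted (k ++ [j]) (fun x => x) false
        if temp ∉ combination then combination ++ [temp] else combination
      else combination) comb).Nodup := by
  induction copy_c generalizing comb with
  | nil => simpa
  | cons k ks ih =>
    simp only [List.foldl_cons]
    apply ih
    by_cases hjk : j ∉ k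
    · simp only [if_pos hjk]
      by_cases hmem : PySem.List.sorted (k ++ [j]) (fun x => x) false ∉ comb
      · simp only [if_pos hmem]
        simp only [List.nodup_append, h, true_and]
        refine ⟨by simp, by simpa [List.Disjoint] using fun a ha hb => hmem (by simpa [hb] using ha)⟩
      · simpa [if_neg hmem] using h
    · simpa [if_neg hjk] using h

lemma nextLevel_mem (i : List Int) (copy_c : List (List Int)) (l : List Int) :
    l ∈ nextLevel i copy_c ↔ ∃ j ∈ i, ∃ k ∈ copy_c, j ∉ k ∧ l = canonL (k ++ [j]) := by
  suffices h : ∀ comb, l ∈ i.foldl (fun combination j =>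
      copy_c.foldl (fun combination k =>
        if j ∉ k then
          let temp := PySem.List.sorted (k ++ [j]) (fun x => x) false
          if temp ∉ combination then combination ++ [temp] else combination
        else combination) combination) comb ↔
      l ∈ comb ∨ ∃ j ∈ i, ∃ k ∈ copy_c, j ∉ k ∧ l = canonL (k ++ [j]) by
    simpa [nextLevel] using h []
  induction i with
  | nil => simp
  | cons j js ih =>
    intro comb
    simp only [List.foldl_cons, ih, innerA_mem]
    constructor
    · rintro ((h | ⟨k, hk, hjk, rfl⟩) | ⟨j', hj', k, hk, hjk, rfl⟩)
      · exact Or.inl h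
      · exact Or.inr ⟨j, by simp, k, hk, hjk, rfl⟩
      · exact Or.inr ⟨j', by simp [hj'], k, hk, hjk, rfl⟩
    · rintro (h | ⟨j', hj', k, hk, hjk, rfl⟩)
      · exact Or.inl (Or.inl h)
      · rcases List.mem_cons.1 hj' with rfl | hj'
        · exact Or.inl (Or.inr ⟨k, hk, hjk, rfl⟩)
        · exact Or.inr ⟨j', hj', k, hk, hjk, rfl⟩

lemma nextLevel_nodup (i : List Int) (copy_c : List (List Int)) :
    (nextLevel i copy_c).Nodup := by
  suffices h : ∀ comb : List (List Int), comb.Nodup → (i.foldl (fun combination j =>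
      copy_c.foldl (fun combination k =>
        if j ∉ k then
          let temp := PySem.List.sorted (k ++ [j]) (fun x => x) false
          if temp ∉ combination then combination ++ [temp] else combination
        else combination) combination) comb).Nodup from h [] List.nodup_nil
  induction i with
  | nil => exact fun comb h => h
  | cons j js ih =>
    intro comb h
    exact ih _ (innerA_nodup j copy_c comb h)

lemma initLevel_eq (i : List Int) : initLevel i = i.map (fun j => [j]) := by
  simpa [initLevel] using PySem.List.foldl_append_singleton_eq_map (fun j : Int => [j]) i []

-- ---- B-side membership and Nodup lemmas ----

lemma dfsB_mem (rest : List (List Int)) :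
    ∀ (chosen : List Int) (results : PySem.Set (List Int)) (l : List Int), chosen.Nodup →
    (l ∈ dfsB rest chosen results ↔ l ∈ results ∨
      ∃ sel, List.Forall₂ (· ∈ ·) sel rest ∧ (chosen ++ sel).Nodup ∧ l = canonL (chosen ++ sel)) := by
  induction rest with
  | nil =>
    intro chosen results l h
    simp only [dfsB, PySem.Set.mem_add]
    constructor
    · rintro (hr | rfl)
      · exact Or.inl hr
      · exact Or.inr ⟨[], List.Forall₂.nil, by simpa using h, by simp [canonL]⟩
    · rintro (hr | ⟨sel, hf, -, rfl⟩)
      · exact Or.inl hr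
      · cases hf
        exact Or.inr (by simp [canonL])
  | cons g rest ih =>
    intro chosen results l h
    have inner : ∀ (g' : List Int) (res : PySem.Set (List Int)),
        l ∈ g'.foldl (fun results j =>
            if j ∉ chosen then dfsB rest (chosen ++ [j]) results else results) res ↔
        l ∈ res ∨ ∃ j ∈ g', j ∉ chosen ∧ ∃ sel, List.Forall₂ (· ∈ ·) sel rest ∧
          ((chosen ++ [j]) ++ sel).Nodup ∧ l = canonL ((chosen ++ [j]) ++ sel) := by
      intro g'
      induction g' with
      | nil => simp
      | cons j js ihg =>
        intro res
        simp only [List.foldl_cons]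
        rw [ihg]
        by_cases hj : j ∉ chosen
        · rw [if_pos hj]
          rw [ih (chosen ++ [j]) res l (nodup_snoc h hj)]
          constructor
          · rintro ((hr | ⟨sel, hf, hnd, rfl⟩) | ⟨j', hj', hjc, sel, hf, hnd, rfl⟩)
            · exact Or.inl hr
            · exact Or.inr ⟨j, by simp, hj, sel, hf, hnd, rfl⟩
            · exact Or.inr ⟨j', by simp [hj'], hjc, sel, hf, hnd, rfl⟩
          · rintro (hr | ⟨j', hj', hjc, sel, hf, hnd, rfl⟩)
            · exact Or.inl (Or.inl hr)
            · rcases List.mem_cons.1 hj' with rfl | hj'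
              · exact Or.inl (Or.inr ⟨sel, hf, hnd, rfl⟩)
              · exact Or.inr ⟨j', hj', hjc, sel, hf, hnd, rfl⟩
        · rw [if_neg hj]
          rw [not_not] at hj
          constructor
          · rintro (hr | ⟨j', hj', hjc, sel, hf, hnd, rfl⟩)
            · exact Or.inl hr
            · exact Or.inr ⟨j', by simp [hj'], hjc, sel, hf, hnd, rfl⟩
          · rintro (hr | ⟨j', hj', hjc, sel, hf, hnd, rfl⟩)
            · exact Or.inl hr
            · rcases List.mem_cons.1 hj' with rfl | hj'
              · exact absurd hj hjc
              · exact Or.inr ⟨j', hj', hjc, sel, hf, hnd, rfl⟩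
    show l ∈ g.foldl _ results ↔ _
    rw [inner g results]
    constructor
    · rintro (hr | ⟨j, hjg, hjc, sel, hf, hnd, rfl⟩)
      · exact Or.inl hr
      · exact Or.inr ⟨j :: sel, List.Forall₂.cons hjg hf,
          by simpa using hnd, by simp⟩
    · rintro (hr | ⟨sel', hf, hnd, rfl⟩)
      · exact Or.inl hr
      · cases hf with
        | @cons j _ sel _ hjg hf =>
          have hjc : j ∉ chosen := by
            simp [List.nodup_append] at hnd
            intro hc
            exact (hnd.2.2 j hc).1 rfl
          exact Or.inr ⟨j, hjg, hjc, sel, hf, by simpa using hnd, by simp⟩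

lemma dfsB_nodup (rest : List (List Int)) :
    ∀ (chosen : List Int) (results : PySem.Set (List Int)), results.Nodup →
    (dfsB rest chosen results).Nodup := by
  induction rest with
  | nil =>
    intro chosen results h
    exact PySem.Set.nodup_add results _ h
  | cons g rest ih =>
    intro chosen results h
    show (g.foldl _ results).Nodup
    induction g generalizing results with
    | nil => simpa
    | cons j js ihg =>
      simp only [List.foldl_cons]
      apply ihg
      by_cases hj : j ∉ chosen
      · rw [if_pos hj]; exact ih _ _ h
      · rwa [if_neg hj]

-- ---- the invariant tying A's level to the current segment of groups ----

def InvA (p a seg : List (List Int)) : Prop :=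
  (∀ l, l ∈ a ↔ (seg ≠ [] ∧ ∃ sel, List.Forall₂ (· ∈ ·) sel seg ∧ sel.Nodup ∧ l = canonL sel)) ∧
  (seg ≠ p.reverse → sdrB p = false) ∧
  (seg ≠ [] → sdrB seg = true) ∧
  (∀ g, seg = [g] → a = g.map (fun j => [j])) ∧
  (seg.length ≠ 1 → a.Nodup)

lemma invA_nil_iff {p a seg : List (List Int)} (h : InvA p a seg) : a = [] ↔ seg = [] := by
  constructor
  · intro ha
    by_contra hseg
    obtain ⟨sel, hf, hnd⟩ := (sdrB_iff seg).1 (h.2.2.1 hseg)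
    have : canonL sel ∈ a := (h.1 _).2 ⟨hseg, sel, hf, hnd, rfl⟩
    simp [ha] at this
  · intro hseg
    rw [List.eq_nil_iff_forall_not_mem]
    intro l hl
    exact ((h.1 l).1 hl).1 hseg

lemma invA_step (p a seg : List (List Int)) (g : List Int) (h : InvA p a seg) :
    InvA (p ++ [g]) (aStep a g) (segStep seg g) := by
  by_cases ha : a = []
  · have hseg : seg = [] := (invA_nil_iff h).1 ha
    subst hseg
    have hstep : aStep a g = g.map (fun j => [j]) := by
      rw [aStep, if_neg (by simpa using ha), initLevel_eq]
    by_cases hg : g = []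
    · subst hg
      have hsdr : sdrB [([] : List Int)] = false := by
        cases hs : sdrB [([] : List Int)] with
        | false => rfl
        | true =>
          have := (sdrB_iff _).1 hs
          rw [sdr_single] at this
          exact absurd rfl this
      refine ⟨?_, ?_, ?_, ?_, ?_⟩
      · intro l
        rw [segStep, if_neg (by simp [hsdr])]
        simp [hstep]
      · intro _
        by_cases hp : p = []
        · subst hp; simpa using hsdr
        · refine not_sdr_append p _ (h.2.1 ?_)
          intro hh
          exact hp (by simpa using congrArg List.reverse hh)
      · intro hne
        exact absurd (by rw [segStep, if_neg (by simp [hsdr])]) hne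
      · intro g' hg'
        rw [segStep, if_neg (by simp [hsdr])] at hg'
        simp at hg'
      · intro _
        simp [hstep]
    · have hsdr : sdrB [g] = true := by
        rw [sdrB_iff]
        exact (sdr_single g).2 hg
      have hsegstep : segStep [] g = [g] := by rw [segStep, if_pos hsdr]
      refine ⟨?_, ?_, ?_, ?_, ?_⟩
      · intro l
        rw [hsegstep, hstep]
        simp only [List.mem_map, ne_eq, List.cons_ne_nil, not_false_eq_true, true_and]
        constructor
        · rintro ⟨j, hj, rfl⟩
          exact ⟨[j], List.Forall₂.cons hj List.Forall₂.nil, by simp, (canonL_singleton j).symm⟩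
        · rintro ⟨sel, hf, -, rfl⟩
          cases hf with
          | cons hj hnil =>
            cases hnil
            exact ⟨_, hj, (canonL_singleton _)⟩
      · intro hne
        rw [hsegstep] at hne
        by_cases hp : p = []
        · subst hp; simp at hne
        · refine not_sdr_append p _ (h.2.1 ?_)
          intro hh
          exact hp (by simpa using congrArg List.reverse hh)
      · intro _
        rw [hsegstep]
        exact hsdr
      · intro g' hg'
        rw [hsegstep] at hg'
        simp at hg'
        subst hg'
        exact hstep
      · intro hlen
        rw [hsegstep] at hlen
        simp at hlen
  · have hseg : seg ≠ [] := fun hs => ha ((invA_nil_iff h).2 hs)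
    have hstep : aStep a g = nextLevel g a := by rw [aStep, if_pos (by simpa using ha)]
    have hmemN : ∀ l, l ∈ nextLevel g a ↔
        ∃ sel, List.Forall₂ (· ∈ ·) sel (g :: seg) ∧ sel.Nodup ∧ l = canonL sel := by
      intro l
      rw [nextLevel_mem]
      constructor
      · rintro ⟨j, hj, k, hk, hjk, rfl⟩
        obtain ⟨-, sel, hf, hnd, rfl⟩ := (h.1 k).1 hk
        have hjs : j ∉ sel := fun hs => hjk ((mem_canonL j sel).2 hs)
        refine ⟨j :: sel, List.Forall₂.cons hj hf, by simp [hnd, hjs], ?_⟩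
        calc canonL (canonL sel ++ [j]) = canonL (sel ++ [j]) :=
              canonL_congr ((canonL_perm sel).append_right [j])
          _ = canonL (j :: sel) := canonL_congr (List.perm_append_singleton j sel)
      · rintro ⟨sel', hf', hnd', rfl⟩
        cases hf' with
        | @cons j _ sel _ hjg hf =>
          have hnd : sel.Nodup := (List.nodup_cons.1 hnd').2
          have hjs : j ∉ sel := (List.nodup_cons.1 hnd').1
          refine ⟨j, hjg, canonL sel, (h.1 _).2 ⟨hseg, sel, hf, hnd, rfl⟩, ?_, ?_⟩
          · exact fun hk => hjs ((mem_canonL j sel).1 hk)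
          · calc canonL (j :: sel) = canonL (sel ++ [j]) :=
                  canonL_congr (List.perm_append_singleton j sel).symm
              _ = canonL (canonL sel ++ [j]) :=
                  canonL_congr ((canonL_perm sel).append_right [j]).symm
    by_cases hsdr : sdrB (g :: seg) = true
    · have hsegstep : segStep seg g = g :: seg := by rw [segStep, if_pos hsdr]
      refine ⟨?_, ?_, ?_, ?_, ?_⟩
      · intro l
        rw [hsegstep, hstep, hmemN l]
        simp only [ne_eq, List.cons_ne_nil, not_false_eq_true, true_and]
      · intro hne
        rw [hsegstep] at hne
        refine not_sdr_append p _ (h.2.1 ?_)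
        intro hh
        exact hne (by simp [hh, List.reverse_append])
      · intro _
        rw [hsegstep]; exact hsdr
      · intro g' hg'
        rw [hsegstep] at hg'
        simp only [List.cons.injEq] at hg'
        exact absurd hg'.2 hseg
      · intro _
        rw [hstep]; exact nextLevel_nodup g a
    · have hsegstep : segStep seg g = [] := by rw [segStep, if_neg hsdr]
      have hnomem : ∀ l, l ∉ nextLevel g a := by
        intro l hl
        obtain ⟨sel, hf, hnd, -⟩ := (hmemN l).1 hl
        exact hsdr ((sdrB_iff _).2 ⟨sel, hf, hnd⟩)
      refine ⟨?_, ?_, ?_, ?_, ?_⟩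
      · intro l
        rw [hsegstep, hstep]
        simp only [ne_eq, not_true_eq_false, false_and, iff_false]
        exact hnomem l
      · intro _
        by_cases hsp : seg = p.reverse
        · subst hsp
          cases hs2 : sdrB (p ++ [g]) with
          | false => rfl
          | true =>
            have hrev : SDR ((p ++ [g]).reverse) := (sdr_reverse _).2 ((sdrB_iff _).1 hs2)
            rw [List.reverse_append] at hrev
            exact absurd ((sdrB_iff _).2 (by simpa using hrev)) hsdr
        · exact not_sdr_append p _ (h.2.1 hsp)
      · intro hne
        rw [hsegstep] at hne
        simp at hne
      · intro g' hg'
        rw [hsegstep] at hg'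
        simp at hg'
      · intro _
        rw [hstep]; exact nextLevel_nodup g a

lemma invA_foldl (l : List (List Int)) :
    ∀ (p a seg : List (List Int)), InvA p a seg →
    InvA (p ++ l) (l.foldl aStep a) (l.foldl segStep seg) := by
  induction l with
  | nil => intro p a seg h; simpa using h
  | cons g rest ih =>
    intro p a seg h
    rw [List.foldl_cons, List.foldl_cons, show p ++ g :: rest = (p ++ [g]) ++ rest from by simp]
    exact ih (p ++ [g]) (aStep a g) (segStep seg g) (invA_step p a seg g h)

lemma invA_base : InvA [] [] [] := by
  refine ⟨?_, ?_, ?_, ?_, ?_⟩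
  · intro l; simp
  · intro h; simp at h
  · intro h; simp at h
  · intro g hg; simp at hg
  · intro _; exact List.nodup_nil

lemma invA_final (arr : List (List Int)) :
    InvA arr (arr.foldl aStep []) (lastSeg arr) := by
  simpa [lastSeg] using invA_foldl arr [] [] [] invA_base

lemma dfsB_empty_of_not_sdr (arr : List (List Int)) (h : sdrB arr = false) :
    dfsB arr [] PySem.Set.empty = [] := by
  rw [List.eq_nil_iff_forall_not_mem]
  intro l hl
  rcases (dfsB_mem arr [] PySem.Set.empty l List.nodup_nil).1 hl with hh | ⟨sel, hf, hnd, -⟩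
  · simp [PySem.Set.empty] at hh
  · rw [(sdrB_iff arr).2 ⟨sel, hf, by simpa using hnd⟩] at h
    simp at h

lemma singleton_inj : Function.Injective (fun j : Int => [j]) := by
  intro a b h
  simpa using h

lemma arr_eq_singleton {arr : List (List Int)} (h : arr.length = 1) : ∃ g, arr = [g] := by
  cases arr with
  | nil => simp at h
  | cons g t =>
    cases t with
    | nil => exact ⟨g, rfl⟩
    | cons _ _ => simp at h

-- ===== VERDICT (by name: the statements are the Claim_ definitions above) =====
theorem count_combination_spec : Claim_unchanged_count_combination := by
  intro arr _ hD
  show count_combination arr = count_combination_alt arr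
  by_cases harr : arr = []
  · subst harr; decide
  · obtain ⟨hmem, hdead, hlive, hinit, hnodup⟩ := invA_final arr
    rw [count_A_eq, count_combination_alt, if_neg harr]
    have hD' : (lastSeg arr = [] ∨ sdrB arr = true) ∧ (arr.length ≠ 1 ∨ arr.flatten.Nodup) := by
      rw [D_count_combination] at hD
      push Not at hD
      constructor
      · by_cases h1 : lastSeg arr = []
        · exact Or.inl h1
        · exact Or.inr (by simpa using hD.1 h1)
      · by_cases h2 : arr.length = 1
        · exact Or.inr (hD.2 h2)
        · exact Or.inl h2
    rcases hD'.1 with hseg | hsdr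
    · have ha : arr.foldl aStep [] = [] :=
        (invA_nil_iff ⟨hmem, hdead, hlive, hinit, hnodup⟩).2 hseg
      have hsdr : sdrB arr = false := by
        refine hdead ?_
        rw [hseg]
        intro hh
        exact harr (by simpa using congrArg List.reverse hh)
      rw [ha, dfsB_empty_of_not_sdr arr hsdr]
    · have hseg : lastSeg arr = arr.reverse := by
        by_contra hne
        rw [hdead hne] at hsdr
        simp at hsdr
      have hsegne : lastSeg arr ≠ [] := by
        rw [hseg]
        simpa using harr
      have hmem2 : ∀ l, l ∈ arr.foldl aStep [] ↔ l ∈ dfsB arr [] PySem.Set.empty := by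
        intro l
        rw [hmem l, dfsB_mem arr [] PySem.Set.empty l List.nodup_nil]
        constructor
        · rintro ⟨-, sel, hf, hnd, rfl⟩
          rw [hseg] at hf
          refine Or.inr ⟨sel.reverse, by simpa using forall2_reverse hf,
            by simpa using hnd, ?_⟩
          simp only [List.nil_append]
          exact canonL_congr (List.reverse_perm sel).symm
        · rintro (h | ⟨sel, hf, hnd, rfl⟩)
          · simp [PySem.Set.empty] at h
          · refine ⟨hsegne, sel.reverse, by rw [hseg]; exact forall2_reverse hf,
              by simpa using hnd, ?_⟩
            simp only [List.nil_append]
            exact canonL_congr (List.reverse_perm sel).symm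
      have hbn : (dfsB arr [] PySem.Set.empty).Nodup := dfsB_nodup arr [] _ List.nodup_nil
      have han : (arr.foldl aStep []).Nodup := by
        by_cases hl : arr.length = 1
        · obtain ⟨g, rfl⟩ := arr_eq_singleton hl
          have hg : g.Nodup := by
            rcases hD'.2 with h | h
            · exact absurd hl h
            · simpa using h
          rw [hinit g (by rw [hseg]; rfl)]
          exact hg.map singleton_inj
        · refine hnodup ?_
          rw [hseg]
          simpa using hl
      have hperm := (List.perm_ext_iff_of_nodup han hbn).2 hmem2
      exact_mod_cast congrArg (Nat.cast (R := Int)) hperm.length_eq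

theorem count_combination_changed : Claim_changed_count_combination := by
  unfold Claim_changed_count_combination; decide

theorem count_combination_tight : Claim_exact_count_combination := by
  intro arr _ hD
  rcases hD with ⟨h1, h2⟩ | ⟨hlen, hnd⟩
  · have harr : arr ≠ [] := by rintro rfl; exact h1 rfl
    obtain ⟨hmem, hdead, hlive, hinit, hnodup⟩ := invA_final arr
    obtain ⟨sel, hf, hnds⟩ := (sdrB_iff _).1 (hlive h1)
    have hamem : canonL sel ∈ arr.foldl aStep [] := (hmem _).2 ⟨h1, sel, hf, hnds, rfl⟩
    have hapos : (arr.foldl aStep []).length ≠ 0 := by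
      intro h0
      rw [List.length_eq_zero_iff] at h0
      simp [h0] at hamem
    have hsdr : sdrB arr = false := by simpa using h2
    rw [count_A_eq, count_combination_alt, if_neg harr, dfsB_empty_of_not_sdr arr hsdr]
    simpa using hapos
  · obtain ⟨g, rfl⟩ := arr_eq_singleton hlen
    have hgnd : ¬ g.Nodup := by simpa using hnd
    have hA : count_combination [g] = (g.length : Int) := by
      rw [count_A_eq]
      have hfold : ([g] : List (List Int)).foldl aStep [] = g.map (fun j => [j]) := by
        simp [aStep, initLevel_eq]
      rw [hfold]
      simp
    have hbn := dfsB_nodup [g] [] PySem.Set.empty List.nodup_nil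
    have hmemb : ∀ l, l ∈ dfsB [g] [] PySem.Set.empty ↔ l ∈ g.dedup.map (fun j => [j]) := by
      intro l
      rw [dfsB_mem [g] [] PySem.Set.empty l List.nodup_nil]
      simp only [List.mem_map, List.mem_dedup]
      constructor
      · rintro (h | ⟨sel, hf, hnd2, rfl⟩)
        · simp [PySem.Set.empty] at h
        · cases hf with
          | @cons j _ s _ hj hs =>
            cases hs
            exact ⟨j, hj, by simp [canonL_singleton]⟩
      · rintro ⟨j, hj, rfl⟩
        exact Or.inr ⟨[j], List.Forall₂.cons hj List.Forall₂.nil, by simp, by simp [canonL_singleton]⟩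
    have hcn : (g.dedup.map (fun j => [j])).Nodup := (List.nodup_dedup g).map singleton_inj
    have hlenb : (dfsB [g] [] PySem.Set.empty).length = g.dedup.length := by
      have := (List.perm_ext_iff_of_nodup hbn hcn).2 hmemb
      simpa using this.length_eq
    have hdl : g.dedup.length ≠ g.length := by
      intro he
      exact hgnd (by rw [← (List.dedup_sublist g).eq_of_length he]; exact List.nodup_dedup g)
    rw [hA, count_combination_alt, if_neg (by simp : ([g] : List (List Int)) ≠ []), hlenb]
    intro he
    exact hdl (by exact_mod_cast he.symm)
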